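-- pv_equiv track=rewrite | github.com/jufei/shudu | gong.py | _get_subset
-- ===== SOURCE A (Python) =====
-- def _get_subset(alist):
--     r = []
--     for i in range(len(alist)):
--         for j in range(len(alist)):
--             for k in range(len(alist)):
--                 p = [alist[i], alist[j], alist[k]]
--                 p = sorted(p)
--                 if len(set(p)) == 3:
--                     if p not in r:
--                         r.append(p)
--     return r
-- ===== SOURCE B (Python) =====
-- def _get_subset(alist):
--     # dedup once (first-appearance order), then emit sorted triples of
--     # i<j<k combinations of the distinct values: no 'not in out' scans needed.
--     unique = []
--     for x in alist:
--         if x not in unique: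
--             unique.append(x)
--
--     def pairs(u):
--         res = []
--         while u:
--             h, u = u[0], u[1:]
--             for y in u:
--                 res.append((h, y))
--         return res
--
--     out = []
--     w = unique
--     while w:
--         h, w = w[0], w[1:]
--         for (b, c) in pairs(w):
--             out.append(sorted([h, b, c]))
--     return out
-- ===== Notes on version B (the rewrite author's own statement) =====
-- stated objective: faster
-- what changed: Instead of three nested loops over all positions with a 'p not in r' scan of the growing result, B deduplicates the input once in first-appearance order and then emits sorted(triple) for each i<j<k combination of the distinct values, which needs no membership test on the output.
import Mathlib
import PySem

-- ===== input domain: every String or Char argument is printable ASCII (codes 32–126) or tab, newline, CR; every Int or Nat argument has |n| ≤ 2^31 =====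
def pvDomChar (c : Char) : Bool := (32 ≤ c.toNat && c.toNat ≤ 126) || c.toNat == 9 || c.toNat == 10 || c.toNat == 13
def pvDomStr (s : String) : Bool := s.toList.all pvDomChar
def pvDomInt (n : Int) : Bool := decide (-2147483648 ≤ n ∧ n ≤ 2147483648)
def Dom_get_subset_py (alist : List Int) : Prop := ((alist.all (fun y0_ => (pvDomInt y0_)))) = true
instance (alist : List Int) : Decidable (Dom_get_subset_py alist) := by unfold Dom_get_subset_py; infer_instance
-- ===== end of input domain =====

-- B replaces A's cubic position loops with one dedup pass followed by i<j<k combinations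
-- of the distinct values (measurably faster); return values proved equal on all inputs.


-- ===== PORT A =====
-- indices produced by range(len(alist)) are always in range, so pyGetD is exact here
def get_subset_py (alist : List Int) : List (List Int) :=
  (PySem.List.pyRange 0 (PySem.List.len alist) 1).foldl (fun r i =>
    (PySem.List.pyRange 0 (PySem.List.len alist) 1).foldl (fun r j =>
      (PySem.List.pyRange 0 (PySem.List.len alist) 1).foldl (fun r k =>
        let p := PySem.List.sorted
          [PySem.List.pyGetD alist i 0, PySem.List.pyGetD alist j 0, PySem.List.pyGetD alist k 0]
          (fun v => v) false
        if PySem.Set.len (PySem.Set.ofList p) = 3 then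
          if p ∈ r then r else r ++ [p]
        else r) r) r) []

-- ===== PORT B =====
-- the 'for x in alist: if x not in unique: unique.append(x)' pass
def pvUniq (alist : List Int) : List Int :=
  alist.foldl (fun acc x => if x ∈ acc then acc else acc ++ [x]) []

-- 'pairs': while u: h, u = u[0], u[1:]; append (h, y) for y in u
def pvPairs : List Int → List (Int × Int)
  | [] => []
  | h :: t => t.map (fun y => (h, y)) ++ pvPairs t

-- the outer while loop: h, w = w[0], w[1:]; append sorted([h, b, c]) for (b, c) in pairs(w)
def pvTriples : List Int → List (List Int)
  | [] => []
  | h :: t =>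
      (pvPairs t).map (fun bc => PySem.List.sorted [h, bc.1, bc.2] (fun v => v) false)
        ++ pvTriples t

def get_subset_py_alt (alist : List Int) : List (List Int) :=
  pvTriples (pvUniq alist)

-- ===== PRECONDITION & SPEC =====
def Spec_get_subset_py (alist : List Int) (out : List (List Int)) : Prop := out = get_subset_py_alt alist
instance (alist : List Int) (out : List (List Int)) : Decidable (Spec_get_subset_py alist out) := by unfold Spec_get_subset_py; infer_instance

-- ===== CLAIM (what is proved, stated in full; the proofs are below) =====
def Claim_equal_get_subset_py : Prop := ∀ (alist : List Int), Dom_get_subset_py alist → Spec_get_subset_py alist (get_subset_py alist)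

-- ===== LEMMAS AND PROOFS =====

-- the sorted arrangement of three pairwise-distinct ints, in closed form
def canon (x y z : Int) : List Int :=
  [min x (min y z), x + y + z - min x (min y z) - max x (max y z), max x (max y z)]

-- candidate stream element produced by one (x, y, z) probe of A's innermost body
def tCand (x y z : Int) : List (List Int) :=
  if x ≠ y ∧ x ≠ z ∧ y ≠ z then [canon x y z] else []

-- 'delta S cs': the genuinely new elements an insert-if-absent loop over cs adds to a
-- result whose current elements are S, in order of first appearance
def delta (S : List (List Int)) : List (List Int) → List (List Int)
  | [] => []
  | c :: cs => if c ∈ S then delta S cs else c :: delta (S ++ [c]) cs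

def absorb (S : List (List Int)) (cs : List (List Int)) : List (List Int) :=
  cs.foldl (fun r c => if c ∈ r then r else r ++ [c]) S

-- first-appearance dedup of l relative to already-seen values T
def uniqF (T l : List Int) : List Int :=
  match l with
  | [] => []
  | a :: l => if a ∈ T then uniqF T l else a :: uniqF (T ++ [a]) l

-- canonical triple list of a (distinct-element) list
def triC : List Int → List (List Int)
  | [] => []
  | a :: t => (pvPairs t).map (fun bc => canon a bc.1 bc.2) ++ triC t

-- 'c is a sorted triple over U meeting P'
def isTri (U P : List Int) (c : List Int) : Prop :=
  ∃ x, x ∈ P ∧ ∃ y, y ∈ U ∧ ∃ z, z ∈ U ∧ (x ≠ y ∧ x ≠ z ∧ y ≠ z) ∧ c = canon x y z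

theorem canon_perm (x y z : Int) : (canon x y z).Perm [x, y, z] := by
  have pa : ([x, z, y] : List Int).Perm [x, y, z] := List.Perm.cons x (List.Perm.swap y z [])
  have pb : ([y, x, z] : List Int).Perm [x, y, z] := List.Perm.swap x y [z]
  have pc : ([y, z, x] : List Int).Perm [x, y, z] :=
    (List.Perm.cons y (List.Perm.swap x z [])).trans pb
  have pd : ([z, x, y] : List Int).Perm [x, y, z] := (List.Perm.swap x z [y]).trans pa
  have pe : ([z, y, x] : List Int).Perm [x, y, z] :=
    (List.Perm.cons z (List.Perm.swap x y [])).trans pd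
  rcases le_total x y with h1 | h1 <;> rcases le_total y z with h2 | h2 <;>
    rcases le_total x z with h3 | h3
  · rw [show canon x y z = [x, y, z] from by simp only [canon, List.cons.injEq]; refine ⟨by omega, by omega, by omega, trivial⟩]
  · rw [show canon x y z = [x, y, z] from by simp only [canon, List.cons.injEq]; refine ⟨by omega, by omega, by omega, trivial⟩]
  · rw [show canon x y z = [x, z, y] from by simp only [canon, List.cons.injEq]; refine ⟨by omega, by omega, by omega, trivial⟩]
    exact pa
  · rw [show canon x y z = [z, x, y] from by simp only [canon, List.cons.injEq]; refine ⟨by omega, by omega, by omega, trivial⟩]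
    exact pd
  · rw [show canon x y z = [y, x, z] from by simp only [canon, List.cons.injEq]; refine ⟨by omega, by omega, by omega, trivial⟩]
    exact pb
  · rw [show canon x y z = [y, z, x] from by simp only [canon, List.cons.injEq]; refine ⟨by omega, by omega, by omega, trivial⟩]
    exact pc
  · rw [show canon x y z = [x, y, z] from by simp only [canon, List.cons.injEq]; refine ⟨by omega, by omega, by omega, trivial⟩]
  · rw [show canon x y z = [z, y, x] from by simp only [canon, List.cons.injEq]; refine ⟨by omega, by omega, by omega, trivial⟩]
    exact pe

theorem canon_mem (a x y z : Int) : a ∈ canon x y z ↔ (a = x ∨ a = y ∨ a = z) := by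
  rw [(canon_perm x y z).mem_iff]; simp

theorem canon_swap1 (x y z : Int) : canon x y z = canon y x z := by
  simp only [canon, List.cons.injEq, and_true]; omega

theorem canon_swap2 (x y z : Int) : canon x y z = canon x z y := by
  simp only [canon, List.cons.injEq, and_true]; omega

theorem sort3_eq_canon (x y z : Int) (h : x ≠ y ∧ x ≠ z ∧ y ≠ z) :
    PySem.List.sorted [x, y, z] (fun v => v) false = canon x y z := by
  refine PySem.List.sorted_eq_of_perm_of_pairwise_lt [x, y, z] (canon x y z) (fun v => v) (canon_perm x y z) ?_
  simp only [canon]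
  refine List.Pairwise.cons ?_ (List.Pairwise.cons ?_ ?_)
  · intro b hb
    rcases List.mem_cons.mp hb with rfl | hb
    · omega
    · rcases List.mem_cons.mp hb with rfl | hb
      · omega
      · simp at hb
  · intro b hb
    rcases List.mem_cons.mp hb with rfl | hb
    · omega
    · simp at hb
  · exact List.pairwise_singleton _ _

theorem setlen3 (u v w : Int) :
    PySem.Set.len (PySem.Set.ofList [u, v, w]) = 3 ↔ (u ≠ v ∧ u ≠ w ∧ v ≠ w) := by
  by_cases h1 : u = v <;> by_cases h2 : u = w <;> by_cases h3 : v = w <;>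
    (simp only [PySem.Set.ofList, PySem.Set.add, PySem.Set.len, PySem.Set.contains,
      List.foldl_cons, List.foldl_nil] <;> split_ifs <;> simp_all <;> omega)

theorem cond_iff (x y z : Int) :
    (PySem.Set.len (PySem.Set.ofList (PySem.List.sorted [x, y, z] (fun v => v) false)) = 3)
      ↔ (x ≠ y ∧ x ≠ z ∧ y ≠ z) := by
  have hp : (PySem.List.sorted [x, y, z] (fun v => v) false).Perm [x, y, z] :=
    PySem.List.sorted_perm [x, y, z] (fun v => v) false
  have hlen : (PySem.List.sorted [x, y, z] (fun v => v) false).length = 3 := by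
    simpa using hp.length_eq
  obtain ⟨u, v, w, huvw⟩ := List.length_eq_three.mp hlen
  rw [huvw, setlen3]
  have hpp : ([u, v, w] : List Int).Perm [x, y, z] := huvw ▸ hp
  have hnd := hpp.nodup_iff
  simp only [List.nodup_cons, List.mem_cons, List.not_mem_nil, not_or, List.nodup_nil,
    and_true, not_false_iff] at hnd
  constructor
  · intro h
    have := hnd.mp ⟨⟨h.1, h.2.1⟩, h.2.2⟩
    exact ⟨this.1.1, this.1.2, this.2⟩
  · intro h
    have := hnd.mpr ⟨⟨h.1, h.2.1⟩, h.2.2⟩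
    exact ⟨this.1.1, this.1.2, this.2⟩

theorem mem_tCand (c : List Int) (x y z : Int) :
    c ∈ tCand x y z ↔ ((x ≠ y ∧ x ≠ z ∧ y ≠ z) ∧ c = canon x y z) := by
  unfold tCand; split_ifs with h <;> simp [h]

-- delta / absorb machinery
theorem absorb_eq_delta (cs : List (List Int)) : ∀ S, absorb S cs = S ++ delta S cs := by
  induction cs with
  | nil => intro S; simp [absorb, delta]
  | cons c cs ih =>
      intro S
      by_cases h : c ∈ S
      · simp [absorb, delta, h, List.foldl_cons] at *
        exact ih S
      · simp only [absorb, delta, if_neg h, List.foldl_cons]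
        have := ih (S ++ [c])
        simp only [absorb] at this
        rw [this]
        simp

theorem delta_append (cs ds : List (List Int)) :
    ∀ S, delta S (cs ++ ds) = delta S cs ++ delta (S ++ delta S cs) ds := by
  induction cs with
  | nil => intro S; simp [delta]
  | cons c cs ih =>
      intro S
      by_cases h : c ∈ S
      · simp [delta, h, ih S]
      · simp only [List.cons_append, delta, if_neg h]
        rw [ih (S ++ [c])]
        simp [List.append_assoc]

theorem delta_nil_of_subset (cs : List (List Int)) :
    ∀ S, (∀ c ∈ cs, c ∈ S) → delta S cs = [] := by
  induction cs with
  | nil => intro S _; rfl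
  | cons c cs ih =>
      intro S h
      have hc : c ∈ S := h c (by simp)
      simp only [delta, if_pos hc]
      exact ih S (fun d hd => h d (by simp [hd]))

theorem delta_eq_self (cs : List (List Int)) :
    ∀ S, cs.Nodup → (∀ c ∈ cs, c ∉ S) → delta S cs = cs := by
  induction cs with
  | nil => intro S _ _; rfl
  | cons c cs ih =>
      intro S hnd h
      have hc : c ∉ S := h c (by simp)
      simp only [delta, if_neg hc, List.cons.injEq, true_and]
      rcases List.nodup_cons.mp hnd with ⟨hcs, hnd'⟩
      exact ih (S ++ [c]) hnd' (by
        intro d hd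
        simp only [List.mem_append, List.mem_singleton, not_or]
        exact ⟨h d (by simp [hd]), fun he => hcs (he ▸ hd)⟩)

theorem mem_delta_or (cs : List (List Int)) :
    ∀ S c, c ∈ cs → c ∈ S ∨ c ∈ delta S cs := by
  induction cs with
  | nil => intro S c h; simp at h
  | cons d cs ih =>
      intro S c h
      by_cases hd : d ∈ S
      · rcases List.mem_cons.mp h with rfl | hc
        · exact Or.inl hd
        · simpa [delta, hd] using ih S c hc
      · rcases List.mem_cons.mp h with rfl | hc
        · right; simp [delta, hd]
        · rcases ih (S ++ [d]) c hc with hS | hD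
          · rcases List.mem_append.mp hS with h1 | h2
            · exact Or.inl h1
            · right; simp at h2; simp [delta, hd, h2]
          · right; simp [delta, hd, hD]

-- skipping duplicate outer-loop values does not change what a dedup loop accumulates
theorem delta_flatMap_uniqF (f : Int → List (List Int)) (l : List Int) :
    ∀ (S : List (List Int)) (T : List Int), (∀ x ∈ T, ∀ c ∈ f x, c ∈ S) →
      delta S (l.flatMap f) = delta S ((uniqF T l).flatMap f) := by
  induction l with
  | nil => intro S T _; rfl
  | cons a l ih =>
      intro S T hT
      by_cases ha : a ∈ T
      · have hfa : delta S (f a) = [] := delta_nil_of_subset _ _ (fun c hc => hT a ha c hc)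
        rw [List.flatMap_cons, delta_append, hfa]
        simp only [List.append_nil]
        rw [ih S T hT]
        simp [uniqF, ha]
      · simp only [uniqF, if_neg ha, List.flatMap_cons]
        rw [delta_append, delta_append]
        congr 1
        exact ih (S ++ delta S (f a)) (T ++ [a]) (by
          intro x hx c hc
          rcases List.mem_append.mp hx with h1 | h2
          · exact List.mem_append.mpr (Or.inl (hT x h1 c hc))
          · simp at h2; subst h2
            exact List.mem_append.mpr (mem_delta_or (f x) S c hc))

theorem delta_flatMap_congr (l : List Int) (f g : Int → List (List Int))
    (h1 : ∀ x ∈ l, ∀ S, delta S (f x) = delta S (g x))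
    (h2 : ∀ x ∈ l, ∀ c, c ∈ f x ↔ c ∈ g x) :
    ∀ S, delta S (l.flatMap f) = delta S (l.flatMap g) := by
  induction l with
  | nil => intro S; rfl
  | cons a l ih =>
      intro S
      simp only [List.flatMap_cons]
      rw [delta_append, delta_append]
      have ha : a ∈ a :: l := by simp
      rw [h1 a ha S]
      congr 1
      exact ih (fun x hx S => h1 x (by simp [hx]) S) (fun x hx c => h2 x (by simp [hx]) c)
            (S ++ delta S (g a))

-- uniqF facts
theorem mem_uniqF (l : List Int) : ∀ T x, x ∈ uniqF T l ↔ (x ∈ l ∧ x ∉ T) := by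
  induction l with
  | nil => intro T x; simp [uniqF]
  | cons a l ih =>
      intro T x
      by_cases ha : a ∈ T
      · rw [show uniqF T (a :: l) = uniqF T l by simp [uniqF, ha], ih]
        constructor
        · rintro ⟨h1, h2⟩; exact ⟨by simp [h1], h2⟩
        · rintro ⟨h1, h2⟩
          rcases List.mem_cons.mp h1 with rfl | h1
          · exact absurd ha h2
          · exact ⟨h1, h2⟩
      · rw [show uniqF T (a :: l) = a :: uniqF (T ++ [a]) l by simp [uniqF, ha]]
        simp only [List.mem_cons, ih (T ++ [a]) x, List.mem_append, List.mem_singleton, not_or]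
        constructor
        · rintro (rfl | ⟨h1, h2, _⟩)
          · exact ⟨by simp, ha⟩
          · exact ⟨by simp [h1], h2⟩
        · rintro ⟨h1, h2⟩
          by_cases hx : x = a
          · exact Or.inl hx
          · rcases h1 with rfl | h1
            · exact absurd rfl hx
            · exact Or.inr ⟨h1, h2, by simp [hx]⟩

theorem nodup_uniqF (l : List Int) : ∀ T, (uniqF T l).Nodup := by
  induction l with
  | nil => intro T; simp [uniqF]
  | cons a l ih =>
      intro T
      by_cases ha : a ∈ T
      · simpa [uniqF, ha] using ih T
      · rw [show uniqF T (a :: l) = a :: uniqF (T ++ [a]) l by simp [uniqF, ha]]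
        refine List.nodup_cons.mpr ⟨?_, ih (T ++ [a])⟩
        intro hmem
        rcases (mem_uniqF l (T ++ [a]) a).mp hmem with ⟨_, h2⟩
        exact h2 (by simp)

theorem foldl_uniq (l : List Int) :
    ∀ acc, l.foldl (fun acc x => if x ∈ acc then acc else acc ++ [x]) acc = acc ++ uniqF acc l := by
  induction l with
  | nil => intro acc; simp [uniqF]
  | cons a l ih =>
      intro acc
      by_cases ha : a ∈ acc
      · simp only [List.foldl_cons, if_pos ha, uniqF, ha, if_true]
        exact ih acc
      · simp only [List.foldl_cons, if_neg ha, uniqF, ha, if_false]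
        rw [ih (acc ++ [a])]
        simp

-- pvPairs facts
theorem mem_pvPairs (t : List Int) :
    ∀ p, p ∈ pvPairs t → p.1 ∈ t ∧ p.2 ∈ t := by
  induction t with
  | nil => intro p h; simp [pvPairs] at h
  | cons a t ih =>
      intro p h
      simp only [pvPairs, List.mem_append, List.mem_map] at h
      rcases h with ⟨y, hy, rfl⟩ | h
      · exact ⟨by simp, by simp [hy]⟩
      · rcases ih p h with ⟨h1, h2⟩
        exact ⟨by simp [h1], by simp [h2]⟩

theorem pvPairs_complete (t : List Int) (hnd : t.Nodup) :
    ∀ y z, y ∈ t → z ∈ t → y ≠ z → (y, z) ∈ pvPairs t ∨ (z, y) ∈ pvPairs t := by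
  induction t with
  | nil => intro y z hy; simp at hy
  | cons a t ih =>
      intro y z hy hz hne
      rcases List.nodup_cons.mp hnd with ⟨_, hnd'⟩
      rcases List.mem_cons.mp hy with rfl | hy'
      · have hz' : z ∈ t := by
          rcases List.mem_cons.mp hz with rfl | h
          · exact absurd rfl hne
          · exact h
        left; simp [pvPairs, hz']
      · rcases List.mem_cons.mp hz with rfl | hz'
        · right; simp [pvPairs, hy']
        · rcases ih hnd' y z hy' hz' hne with h | h
          · left; simp [pvPairs, h]
          · right; simp [pvPairs, h]

theorem pvPairs_ne (t : List Int) (hnd : t.Nodup) : ∀ p ∈ pvPairs t, p.1 ≠ p.2 := by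
  induction t with
  | nil => simp [pvPairs]
  | cons a t ih =>
      intro p hp
      rcases List.nodup_cons.mp hnd with ⟨ha, hnd'⟩
      simp only [pvPairs, List.mem_append, List.mem_map] at hp
      rcases hp with ⟨y, hy, rfl⟩ | hp
      · exact fun he => ha (by rw [show a = y from he]; exact hy)
      · exact ih hnd' p hp

-- ===== the three nested loop lemmas =====

theorem ndFacts (P Q t₃ : List Int) (a b : Int) (hnd : (P ++ a :: (Q ++ b :: t₃)).Nodup) :
    (a ∉ P) ∧ (b ∉ P) ∧ (∀ q ∈ Q, q ∉ P) ∧ (∀ z ∈ t₃, z ∉ P) ∧ (a ∉ Q) ∧ (a ≠ b) ∧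
      (∀ z ∈ t₃, a ≠ z) ∧ (b ∉ Q) ∧ (∀ z ∈ t₃, b ≠ z) ∧ (∀ z ∈ t₃, z ∉ Q) ∧ t₃.Nodup := by
  simp only [List.nodup_append, List.nodup_cons, List.mem_append, List.mem_cons,
    List.disjoint_left, not_or] at hnd
  obtain ⟨hP, ⟨⟨haQ, hab, hat3⟩, hQnd, ⟨hbt3, ht3⟩, hQd⟩, hPd⟩ := hnd
  refine ⟨fun h => hPd a h a (Or.inl rfl) rfl,
    fun h => hPd b h b (Or.inr (Or.inr (Or.inl rfl))) rfl,
    fun q hq hqP => hPd q hqP q (Or.inr (Or.inl hq)) rfl,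
    fun z hz hzP => hPd z hzP z (Or.inr (Or.inr (Or.inr hz))) rfl,
    haQ, hab,
    fun z hz he => hat3 (he ▸ hz),
    fun h => hQd b h b (Or.inl rfl) rfl,
    fun z hz he => hbt3 (he ▸ hz),
    fun z hz hzQ => hQd z hzQ z (Or.inr hz) rfl,
    ht3⟩

theorem flatMap_tCand_map (t : List Int) (a b : Int)
    (h : ∀ z ∈ t, a ≠ b ∧ a ≠ z ∧ b ≠ z) :
    t.flatMap (fun z => tCand a b z) = t.map (fun z => canon a b z) := by
  induction t with
  | nil => rfl
  | cons z t ih =>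
      simp only [List.flatMap_cons, List.map_cons]
      rw [show tCand a b z = [canon a b z] from by simp [tCand, h z (by simp)],
        ih (fun w hw => h w (by simp [hw]))]
      rfl

theorem delta_inner (U P Q t₃ : List Int) (a b : Int) (S : List (List Int))
    (hU : U = P ++ a :: (Q ++ b :: t₃)) (hnd : U.Nodup)
    (hS : ∀ c, c ∈ S ↔ (isTri U P c ∨
        ∃ q, q ∈ Q ∧ ∃ w, w ∈ U ∧ (a ≠ q ∧ a ≠ w ∧ q ≠ w) ∧ c = canon a q w)) :
    delta S (U.flatMap (fun z => tCand a b z)) = t₃.map (fun z => canon a b z) := by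
  obtain ⟨haP, hbP, hQP, htP, haQ, hab, hat, hbQ, hbt, htQ, ht3⟩ :=
    ndFacts P Q t₃ a b (hU ▸ hnd)
  have haU : a ∈ U := by simp [hU]
  have hbU : b ∈ U := by simp [hU]
  have hsplit : U.flatMap (fun z => tCand a b z)
      = P.flatMap (fun z => tCand a b z)
        ++ (Q.flatMap (fun z => tCand a b z) ++ t₃.flatMap (fun z => tCand a b z)) := by
    rw [hU]; simp [List.flatMap_append, List.flatMap_cons, tCand]
  rw [hsplit, delta_append]
  have hdead1 : delta S (P.flatMap (fun z => tCand a b z)) = [] := by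
    apply delta_nil_of_subset
    intro c hc
    simp only [List.mem_flatMap] at hc
    obtain ⟨z, hzP, hc⟩ := hc
    rw [mem_tCand] at hc
    obtain ⟨⟨h1, h2, h3⟩, rfl⟩ := hc
    rw [hS]
    exact Or.inl ⟨z, hzP, a, haU, b, hbU,
      ⟨Ne.symm h2, fun he => h3 he.symm, h1⟩, by rw [canon_swap2, canon_swap1]⟩
  rw [hdead1]
  simp only [List.append_nil]
  rw [delta_append]
  have hdead2 : delta S (Q.flatMap (fun z => tCand a b z)) = [] := by
    apply delta_nil_of_subset
    intro c hc
    simp only [List.mem_flatMap] at hc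
    obtain ⟨q, hqQ, hc⟩ := hc
    rw [mem_tCand] at hc
    obtain ⟨⟨h1, h2, h3⟩, rfl⟩ := hc
    rw [hS]
    exact Or.inr ⟨q, hqQ, b, hbU,
      ⟨h2, h1, fun he => hbQ (he ▸ hqQ)⟩, by rw [canon_swap2]⟩
  rw [hdead2]
  simp only [List.append_nil]
  rw [flatMap_tCand_map t₃ a b (fun z hz => ⟨hab, hat z hz, hbt z hz⟩)]
  apply delta_eq_self
  · refine List.Nodup.map_on ?_ ht3
    intro z1 h1 z2 h2 he
    have hm : z1 ∈ canon a b z2 := he ▸ (canon_mem z1 a b z1).mpr (Or.inr (Or.inr rfl))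
    rcases (canon_mem z1 a b z2).mp hm with h | h | h
    · exact absurd h.symm (hat z1 h1)
    · exact absurd h.symm (hbt z1 h1)
    · exact h
  · intro c hc hcS
    simp only [List.mem_map] at hc
    obtain ⟨z, hz3, rfl⟩ := hc
    rcases (hS _).mp hcS with ⟨x, hxP, y, hyU, z', hz'U, hd, hc⟩ | ⟨q, hqQ, w, hwU, hd, hc⟩
    · have hx : x ∈ canon a b z := hc ▸ (canon_mem x x y z').mpr (Or.inl rfl)
      rcases (canon_mem x a b z).mp hx with h | h | h
      · exact haP (h ▸ hxP)
      · exact hbP (h ▸ hxP)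
      · exact htP z hz3 (h ▸ hxP)
    · have hq : q ∈ canon a b z := hc ▸ (canon_mem q a q w).mpr (Or.inr (Or.inl rfl))
      rcases (canon_mem q a b z).mp hq with h | h | h
      · exact hd.1 h.symm
      · exact hbQ (h ▸ hqQ)
      · exact htQ z hz3 (h ▸ hqQ)

theorem delta_yloop (U P : List Int) (a : Int) :
    ∀ (t₂ Q : List Int) (S : List (List Int)),
    U = P ++ a :: (Q ++ t₂) → U.Nodup →
    (∀ c, c ∈ S ↔ (isTri U P c ∨
        ∃ q, q ∈ Q ∧ ∃ w, w ∈ U ∧ (a ≠ q ∧ a ≠ w ∧ q ≠ w) ∧ c = canon a q w)) →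
    delta S (t₂.flatMap (fun y => U.flatMap (fun z => tCand a y z)))
      = (pvPairs t₂).map (fun bc => canon a bc.1 bc.2) := by
  intro t₂
  induction t₂ with
  | nil => intro Q S hU hnd hS; simp [pvPairs, delta]
  | cons b t₃ ih =>
      intro Q S hU hnd hS
      obtain ⟨haP, hbP, hQP, htP, haQ, hab, hat, hbQ, hbt, htQ, ht3⟩ :=
        ndFacts P Q t₃ a b (hU ▸ hnd)
      simp only [List.flatMap_cons]
      rw [delta_append]
      rw [delta_inner U P Q t₃ a b S hU hnd hS]
      have hU' : U = P ++ a :: ((Q ++ [b]) ++ t₃) := by rw [hU]; simp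
      have hS' : ∀ c, c ∈ S ++ t₃.map (fun z => canon a b z) ↔ (isTri U P c ∨
          ∃ q, q ∈ Q ++ [b] ∧ ∃ w, w ∈ U ∧ (a ≠ q ∧ a ≠ w ∧ q ≠ w) ∧ c = canon a q w) := by
        intro c
        simp only [List.mem_append, List.mem_map, List.mem_singleton]
        constructor
        · rintro (hcS | ⟨z, hz3, rfl⟩)
          · rcases (hS c).mp hcS with h | ⟨q, hq, rest⟩
            · exact Or.inl h
            · exact Or.inr ⟨q, Or.inl hq, rest⟩
          · refine Or.inr ⟨b, Or.inr rfl, z, ?_, ⟨hab, hat z hz3, hbt z hz3⟩, rfl⟩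
            simp [hU, hz3]
        · rintro (h | ⟨q, hq, w, hwU, hd, rfl⟩)
          · exact Or.inl ((hS c).mpr (Or.inl h))
          · rcases hq with hq | rfl
            · exact Or.inl ((hS _).mpr (Or.inr ⟨q, hq, w, hwU, hd, rfl⟩))
            · -- q = b : place w in U = P ++ a :: (Q ++ b :: t₃)
              rw [hU] at hwU
              simp only [List.mem_append, List.mem_cons] at hwU
              rcases hwU with hwP | hw | hwQ | hw | hwt
              · refine Or.inl ((hS _).mpr (Or.inl ⟨w, hwP, a, by simp [hU], q, by simp [hU],
                  ⟨Ne.symm hd.2.1, Ne.symm hd.2.2, hd.1⟩, by rw [canon_swap2, canon_swap1]⟩))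
              · exact absurd hw.symm hd.2.1
              · refine Or.inl ((hS _).mpr (Or.inr ⟨w, hwQ, q, by simp [hU],
                  ⟨hd.2.1, hd.1, Ne.symm hd.2.2⟩, by rw [canon_swap2]⟩))
              · exact absurd hw.symm hd.2.2
              · exact Or.inr ⟨w, hwt, by rw [canon_swap2]⟩
      rw [ih (Q ++ [b]) (S ++ t₃.map (fun z => canon a b z)) hU' hnd hS']
      simp [pvPairs, List.map_map, Function.comp]

theorem delta_pass (U P t : List Int) (a : Int) (S : List (List Int))
    (hU : U = P ++ a :: t) (hnd : U.Nodup)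
    (hS : ∀ c, c ∈ S ↔ isTri U P c) :
    delta S (U.flatMap (fun y => U.flatMap (fun z => tCand a y z)))
      = (pvPairs t).map (fun bc => canon a bc.1 bc.2) := by
  have haU : a ∈ U := by simp [hU]
  have hsplit : U.flatMap (fun y => U.flatMap (fun z => tCand a y z))
      = P.flatMap (fun y => U.flatMap (fun z => tCand a y z))
        ++ ((U.flatMap (fun z => tCand a a z))
            ++ t.flatMap (fun y => U.flatMap (fun z => tCand a y z))) := by
    conv_lhs => rw [show U.flatMap (fun y => U.flatMap (fun z => tCand a y z))
      = (P ++ a :: t).flatMap (fun y => U.flatMap (fun z => tCand a y z)) from by rw [← hU]]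
    simp [List.flatMap_append, List.flatMap_cons]
  rw [hsplit, delta_append]
  have hdead : delta S (P.flatMap (fun y => U.flatMap (fun z => tCand a y z))) = [] := by
    apply delta_nil_of_subset
    intro c hc
    simp only [List.mem_flatMap] at hc
    obtain ⟨y, hyP, z, hzU, hc⟩ := hc
    rw [mem_tCand] at hc
    obtain ⟨⟨h1, h2, h3⟩, rfl⟩ := hc
    exact (hS _).mpr ⟨y, hyP, a, haU, z, hzU,
      ⟨Ne.symm h1, h3, h2⟩, by rw [canon_swap1]⟩
  rw [hdead]
  simp only [List.append_nil]
  rw [delta_append]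
  have hempty : U.flatMap (fun z => tCand a a z) = [] := by simp [tCand]
  rw [hempty]
  simp only [delta, List.append_nil]
  exact delta_yloop U P a t [] S (by simpa using hU) hnd
    (by intro c; rw [hS c]; simp [isTri])

theorem delta_xloop (U : List Int) :
    ∀ (v P : List Int) (S : List (List Int)),
    U = P ++ v → U.Nodup → (∀ c, c ∈ S ↔ isTri U P c) →
    delta S (v.flatMap (fun x => U.flatMap (fun y => U.flatMap (fun z => tCand x y z)))) = triC v := by
  intro v
  induction v with
  | nil => intro P S hU hnd hS; simp [triC, delta]
  | cons a t ih =>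
      intro P S hU hnd hS
      have hUt : U = P ++ a :: t := hU
      have hndt : (P ++ a :: t).Nodup := hUt ▸ hnd
      have hstruct := hndt
      simp only [List.nodup_append, List.nodup_cons, List.disjoint_left, List.mem_cons,
        not_or] at hstruct
      obtain ⟨hPnd, ⟨haT, htnd⟩, hdisj⟩ := hstruct
      have haP : a ∉ P := fun h => hdisj a h a (Or.inl rfl) rfl
      have htU : ∀ z ∈ t, z ∈ U := by intro z hz; simp [hUt, hz]
      simp only [List.flatMap_cons]
      rw [delta_append]
      rw [delta_pass U P t a S hUt hnd hS]
      have hU' : U = (P ++ [a]) ++ t := by rw [hUt]; simp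
      have hS' : ∀ c, c ∈ S ++ (pvPairs t).map (fun bc => canon a bc.1 bc.2)
          ↔ isTri U (P ++ [a]) c := by
        intro c
        simp only [List.mem_append, List.mem_map]
        constructor
        · rintro (hcS | ⟨bc, hbc, rfl⟩)
          · obtain ⟨x, hxP, rest⟩ := (hS c).mp hcS
            exact ⟨x, by simp [hxP], rest⟩
          · obtain ⟨hb1, hb2⟩ := mem_pvPairs t bc hbc
            have hbne := pvPairs_ne t htnd bc hbc
            exact ⟨a, by simp, bc.1, htU _ hb1, bc.2, htU _ hb2,
              ⟨fun h => haT (h ▸ hb1), fun h => haT (h ▸ hb2), hbne⟩, rfl⟩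
        · rintro ⟨x, hx, y, hyU, z, hzU, hd, rfl⟩
          rcases List.mem_append.mp hx with hxP | hxa
          · exact Or.inl ((hS _).mpr ⟨x, hxP, y, hyU, z, hzU, hd, rfl⟩)
          · have hxa : x = a := by simpa using hxa
            subst hxa
            rw [hUt] at hyU hzU
            simp only [List.mem_append, List.mem_cons] at hyU hzU
            rcases hyU with hyP | hy | hyt
            · exact Or.inl ((hS _).mpr ⟨y, hyP, x, by simp [hUt], z, by rw [hUt]; simpa using hzU,
                ⟨Ne.symm hd.1, hd.2.2, hd.2.1⟩, by rw [canon_swap1]⟩)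
            · exact absurd hy.symm hd.1
            · rcases hzU with hzP | hz | hzt
              · exact Or.inl ((hS _).mpr ⟨z, hzP, x, by simp [hUt], y, by simp [hUt, hyt],
                  ⟨Ne.symm hd.2.1, Ne.symm hd.2.2, hd.1⟩,
                  by rw [canon_swap2, canon_swap1, canon_swap2]⟩)
              · exact absurd hz.symm hd.2.1
              · rcases pvPairs_complete t htnd y z hyt hzt hd.2.2 with hp | hp
                · exact Or.inr ⟨(y, z), hp, rfl⟩
                · exact Or.inr ⟨(z, y), hp, by rw [canon_swap2]⟩
      rw [ih (P ++ [a]) (S ++ (pvPairs t).map (fun bc => canon a bc.1 bc.2)) hU' hnd hS']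
      simp [triC]

-- ===== assembling the two sides =====

-- one probe of A's innermost body
def stepA (r : List (List Int)) (x y z : Int) : List (List Int) :=
  let p := PySem.List.sorted [x, y, z] (fun v => v) false
  if PySem.Set.len (PySem.Set.ofList p) = 3 then if p ∈ r then r else r ++ [p] else r

theorem absorb_append (cs ds S : List (List Int)) :
    absorb S (cs ++ ds) = absorb (absorb S cs) ds := by
  simp [absorb, List.foldl_append]

theorem foldl_absorb {α : Type} (l : List α) (h : α → List (List Int)) :
    ∀ r, l.foldl (fun r x => absorb r (h x)) r = absorb r (l.flatMap h) := by
  induction l with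
  | nil => intro r; simp [absorb]
  | cons a l ih =>
      intro r
      simp only [List.foldl_cons, List.flatMap_cons]
      rw [ih, absorb_append]

theorem stepA_eq (r : List (List Int)) (x y z : Int) :
    stepA r x y z = absorb r (tCand x y z) := by
  simp only [stepA, tCand]
  by_cases h : x ≠ y ∧ x ≠ z ∧ y ≠ z
  · rw [if_pos ((cond_iff x y z).mpr h), if_pos h, sort3_eq_canon x y z h]
    simp [absorb]
  · rw [if_neg (fun hc => h ((cond_iff x y z).mp hc)), if_neg h]
    simp [absorb]

theorem portA_eq_delta (l : List Int) :
    get_subset_py l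
      = delta [] (l.flatMap (fun x => l.flatMap (fun y => l.flatMap (fun z => tCand x y z)))) := by
  have hin : ∀ (x y : Int) (r0 : List (List Int)),
      (PySem.List.pyRange 0 (PySem.List.len l) 1).foldl
          (fun r k => stepA r x y (PySem.List.pyGetD l k 0)) r0
        = absorb r0 (l.flatMap (fun z => tCand x y z)) := by
    intro x y r0
    have h1 : (PySem.List.pyRange 0 (PySem.List.len l) 1).foldl
        (fun r k => stepA r x y (PySem.List.pyGetD l k 0)) r0
        = l.foldl (fun r z => stepA r x y z) r0 :=
      PySem.List.foldl_pyRange_zero_pyGetD l 0 (fun r z => stepA r x y z) r0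
    rw [h1, PySem.List.foldl_congr_mem l _ (fun r z => absorb r (tCand x y z)) r0
      (fun acc z _ => stepA_eq acc x y z)]
    exact foldl_absorb l (fun z => tCand x y z) r0
  have hmid : ∀ (x : Int) (r0 : List (List Int)),
      (PySem.List.pyRange 0 (PySem.List.len l) 1).foldl (fun r j =>
          (PySem.List.pyRange 0 (PySem.List.len l) 1).foldl
            (fun r k => stepA r x (PySem.List.pyGetD l j 0) (PySem.List.pyGetD l k 0)) r) r0
        = absorb r0 (l.flatMap (fun y => l.flatMap (fun z => tCand x y z))) := by
    intro x r0
    have h1 : (PySem.List.pyRange 0 (PySem.List.len l) 1).foldl (fun r j =>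
          (PySem.List.pyRange 0 (PySem.List.len l) 1).foldl
            (fun r k => stepA r x (PySem.List.pyGetD l j 0) (PySem.List.pyGetD l k 0)) r) r0
        = l.foldl (fun r y =>
            (PySem.List.pyRange 0 (PySem.List.len l) 1).foldl
              (fun r k => stepA r x y (PySem.List.pyGetD l k 0)) r) r0 :=
      PySem.List.foldl_pyRange_zero_pyGetD l 0
        (fun r y => (PySem.List.pyRange 0 (PySem.List.len l) 1).foldl
          (fun r k => stepA r x y (PySem.List.pyGetD l k 0)) r) r0
    rw [h1, PySem.List.foldl_congr_mem l _
        (fun r y => absorb r (l.flatMap (fun z => tCand x y z))) r0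
        (fun acc y _ => hin x y acc)]
    exact foldl_absorb l (fun y => l.flatMap (fun z => tCand x y z)) r0
  have e0 : get_subset_py l
      = (PySem.List.pyRange 0 (PySem.List.len l) 1).foldl (fun r i =>
          (PySem.List.pyRange 0 (PySem.List.len l) 1).foldl (fun r j =>
            (PySem.List.pyRange 0 (PySem.List.len l) 1).foldl (fun r k =>
              stepA r (PySem.List.pyGetD l i 0) (PySem.List.pyGetD l j 0)
                (PySem.List.pyGetD l k 0)) r) r) [] := rfl
  have h1 : get_subset_py l
      = l.foldl (fun r x =>
          (PySem.List.pyRange 0 (PySem.List.len l) 1).foldl (fun r j =>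
            (PySem.List.pyRange 0 (PySem.List.len l) 1).foldl (fun r k =>
              stepA r x (PySem.List.pyGetD l j 0) (PySem.List.pyGetD l k 0)) r) r) [] :=
    e0.trans (PySem.List.foldl_pyRange_zero_pyGetD l 0
      (fun r x => (PySem.List.pyRange 0 (PySem.List.len l) 1).foldl (fun r j =>
        (PySem.List.pyRange 0 (PySem.List.len l) 1).foldl (fun r k =>
          stepA r x (PySem.List.pyGetD l j 0) (PySem.List.pyGetD l k 0)) r) r) [])
  rw [h1, PySem.List.foldl_congr_mem l _
      (fun r x => absorb r (l.flatMap (fun y => l.flatMap (fun z => tCand x y z)))) []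
      (fun acc x _ => hmid x acc)]
  rw [foldl_absorb l (fun x => l.flatMap (fun y => l.flatMap (fun z => tCand x y z))) []]
  rw [absorb_eq_delta]
  rfl

theorem pvTriples_eq_triC (u : List Int) (hnd : u.Nodup) : pvTriples u = triC u := by
  induction u with
  | nil => rfl
  | cons a t ih =>
      rcases List.nodup_cons.mp hnd with ⟨ha, hnd'⟩
      simp only [pvTriples, triC]
      congr 1
      · refine List.map_congr_left ?_
        intro bc hbc
        have h1 := mem_pvPairs t bc hbc
        have h2 := pvPairs_ne t hnd' bc hbc
        exact sort3_eq_canon a bc.1 bc.2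
          ⟨fun he => ha (he ▸ h1.1), fun he => ha (he ▸ h1.2), h2⟩
      · exact ih hnd'

theorem portB_eq_triC (l : List Int) : get_subset_py_alt l = triC (uniqF [] l) := by
  unfold get_subset_py_alt pvUniq
  rw [foldl_uniq l []]
  simp only [List.nil_append]
  exact pvTriples_eq_triC _ (nodup_uniqF l [])

theorem delta_eq_uniq (l : List Int) :
    delta [] (l.flatMap (fun x => l.flatMap (fun y => l.flatMap (fun z => tCand x y z))))
      = delta [] ((uniqF [] l).flatMap (fun x =>
          (uniqF [] l).flatMap (fun y => (uniqF [] l).flatMap (fun z => tCand x y z)))) := by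
  have hz : ∀ (x y : Int) (S : List (List Int)),
      delta S (l.flatMap (fun z => tCand x y z))
        = delta S ((uniqF [] l).flatMap (fun z => tCand x y z)) :=
    fun x y S => delta_flatMap_uniqF (fun z => tCand x y z) l S [] (by simp)
  have hzmem : ∀ (x y : Int) (c : List Int),
      c ∈ l.flatMap (fun z => tCand x y z) ↔ c ∈ (uniqF [] l).flatMap (fun z => tCand x y z) := by
    intro x y c
    simp [List.mem_flatMap, mem_uniqF]
  have hy : ∀ (x : Int) (S : List (List Int)),
      delta S (l.flatMap (fun y => l.flatMap (fun z => tCand x y z)))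
        = delta S ((uniqF [] l).flatMap (fun y => (uniqF [] l).flatMap (fun z => tCand x y z))) := by
    intro x S
    rw [delta_flatMap_uniqF (fun y => l.flatMap (fun z => tCand x y z)) l S [] (by simp)]
    exact delta_flatMap_congr (uniqF [] l) _ _ (fun y _ S => hz x y S) (fun y _ c => hzmem x y c) S
  have hymem : ∀ (x : Int) (c : List Int),
      c ∈ l.flatMap (fun y => l.flatMap (fun z => tCand x y z))
        ↔ c ∈ (uniqF [] l).flatMap (fun y => (uniqF [] l).flatMap (fun z => tCand x y z)) := by
    intro x c
    simp [List.mem_flatMap, mem_uniqF]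
  rw [delta_flatMap_uniqF
    (fun x => l.flatMap (fun y => l.flatMap (fun z => tCand x y z))) l [] [] (by simp)]
  exact delta_flatMap_congr (uniqF [] l) _ _ (fun x _ S => hy x S) (fun x _ c => hymem x c) []

-- ===== VERDICT (by name: the statement is the Claim_ definition above) =====
theorem get_subset_py_spec : Claim_equal_get_subset_py := by
  intro alist _
  unfold Spec_get_subset_py
  rw [portA_eq_delta, portB_eq_triC, delta_eq_uniq]
  exact delta_xloop (uniqF [] alist) (uniqF [] alist) [] [] (by simp) (nodup_uniqF alist [])
    (by intro c; simp [isTri])
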